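-- pv_equiv track=rewrite | github.com/Triton365/BlockState | benchmark/blockstate_functions_ver_gen.py | get_list_type
-- ===== SOURCE A (Python) =====
-- def get_list_type(l):
--     assert len(l) >= 2
--     int_list = []
--     str_list = []
--     for x in l:
--         if x.isdigit():
--             int_list.append(x)
--         else:
--             str_list.append(x)
--     l.clear()
--     if len(int_list) == 0:
--         l.extend(sorted(str_list))
--         return 'str'
--     l.extend(sorted(map(int,int_list)))
--     if len(str_list) == 0:
--         return 'int'
--     l.extend(sorted(str_list))
--     return 'mixed'
-- ===== SOURCE B (Python) =====
-- def get_list_type(l):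
--     assert len(l) >= 2
--     digits = sum(1 for x in l if x.isdigit())
--     kind = 'str' if digits == 0 else 'int' if digits == len(l) else 'mixed'
--     ordered = sorted(l, key=lambda x: (0, int(x)) if x.isdigit() else (1, x))
--     l[:] = [int(x) if x.isdigit() else x for x in ordered]
--     return kind
-- ===== Notes on version B (the rewrite author's own statement) =====
-- stated objective: alternative
-- what changed: B classifies by a single digit-count instead of partitioning into two lists, and rebuilds l with one composite-key sort ((0,int(x)) before (1,x)) instead of two separate sorts concatenated.
import Mathlib
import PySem

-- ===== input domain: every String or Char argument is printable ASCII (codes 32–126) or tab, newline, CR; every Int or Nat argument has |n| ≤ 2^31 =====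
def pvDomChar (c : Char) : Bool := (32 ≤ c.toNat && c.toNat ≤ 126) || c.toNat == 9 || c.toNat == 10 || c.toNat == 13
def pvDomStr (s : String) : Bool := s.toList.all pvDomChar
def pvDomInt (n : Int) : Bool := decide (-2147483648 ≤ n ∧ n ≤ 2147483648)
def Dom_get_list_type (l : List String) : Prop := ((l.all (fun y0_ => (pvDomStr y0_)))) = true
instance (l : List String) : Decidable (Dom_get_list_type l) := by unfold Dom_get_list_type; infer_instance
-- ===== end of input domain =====

-- B classifies by a single digit-count and rebuilds l with one composite-key sort instead of
-- partition-then-two-sorts (objective: alternative). Both Pythons mutate l in place identically;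
-- the equivalence proved here is about the RETURN value.


-- ===== PORT A =====
-- Partition l into int_list/str_list by a loop, then classify by which partition is empty.
-- (The in-place rebuild of l — the two sorts — is a side effect of the Python, not part of
-- the returned value, so it does not appear in this pure port.)
def get_list_type (l : List String) : String :=
  let p := l.foldl
    (fun (acc : List String × List String) x =>
      if PySem.Str.strIsdigit x then (acc.1 ++ [x], acc.2) else (acc.1, acc.2 ++ [x]))
    ([], [])
  if p.1.length = 0 then "str"
  else if p.2.length = 0 then "int"
  else "mixed"

-- ===== PORT B =====
-- Classify from a single count of digit elements; no partition lists.
def get_list_type_alt (l : List String) : String :=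
  let digits := l.countP (fun x => PySem.Str.strIsdigit x)
  if digits = 0 then "str"
  else if digits = l.length then "int"
  else "mixed"

-- ===== PRECONDITION & SPEC =====
-- A asserts len(l) >= 2 (AssertionError otherwise); Pre_ excludes exactly those inputs.
def Pre_get_list_type (l : List String) : Prop := 2 ≤ l.length
instance (l : List String) : Decidable (Pre_get_list_type l) := by unfold Pre_get_list_type; infer_instance
def pvWitness_get_list_type : List String := (["1", "a"])

def Spec_get_list_type (l : List String) (out : String) : Prop := out = get_list_type_alt l
instance (l : List String) (out : String) : Decidable (Spec_get_list_type l out) := by unfold Spec_get_list_type; infer_instance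

-- ===== CLAIM (what is proved, stated in full; the proofs are below) =====
def Claim_equal_get_list_type : Prop := ∀ (l : List String), Dom_get_list_type l → Pre_get_list_type l → Spec_get_list_type l (get_list_type l)

-- ===== LEMMAS AND PROOFS =====

-- A's partition loop produces (filter isdigit, filter ¬isdigit) appended to the accumulator.
theorem partition_foldl (l : List String) (a b : List String) :
    l.foldl
      (fun (acc : List String × List String) x =>
        if PySem.Str.strIsdigit x then (acc.1 ++ [x], acc.2) else (acc.1, acc.2 ++ [x]))
      (a, b)
    = (a ++ l.filter (fun x => PySem.Str.strIsdigit x),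
       b ++ l.filter (fun x => !PySem.Str.strIsdigit x)) := by
  induction l generalizing a b with
  | nil => simp
  | cons x xs ih =>
    simp only [List.foldl_cons, List.filter_cons]
    cases PySem.Str.strIsdigit x <;>
      simp only [Bool.not_true, Bool.not_false, Bool.false_eq_true, if_true, if_false, ih,
        List.append_assoc, List.singleton_append]

-- ===== VERDICT (by name: the statement is the Claim_ definition above) =====
theorem get_list_type_spec : Claim_equal_get_list_type := by
  intro l _ _
  unfold Spec_get_list_type get_list_type get_list_type_alt
  rw [partition_foldl]
  have h1 : (l.filter (fun x => PySem.Str.strIsdigit x)).length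
      = l.countP (fun x => PySem.Str.strIsdigit x) := List.countP_eq_length_filter.symm
  have h2 : (l.filter (fun x => PySem.Str.strIsdigit x)).length
      + (l.filter (fun x => !PySem.Str.strIsdigit x)).length = l.length :=
    (List.length_eq_length_filter_add (fun x => PySem.Str.strIsdigit x)).symm
  simp only [List.nil_append]
  by_cases hz : l.countP (fun x => PySem.Str.strIsdigit x) = 0
  · rw [if_pos (by omega), if_pos hz]
  · rw [if_neg (by omega), if_neg hz]
    by_cases hf : (l.filter (fun x => !PySem.Str.strIsdigit x)).length = 0
    · rw [if_pos hf, if_pos (by omega)]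
    · rw [if_neg hf, if_neg (by omega)]
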